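-- pv_equiv track=rewrite | github.com/NinoCoelho/nexus | agent/src/nexus/vault_graph/scoped.py | _expand_hops
-- ===== SOURCE A (Python) =====
-- from typing import Any
--
-- def _expand_hops(
--     seed_paths: set[str],
--     full_edges: list[Any],
--     hops: int,
-- ) -> set[str]:
--     """BFS expansion from seed_paths over full_edges for (hops - 1) additional hops."""
--     adj: dict[str, set[str]] = {}
--     for e in full_edges:
--         adj.setdefault(e["from_"], set()).add(e["to_"])
--         adj.setdefault(e["to_"], set()).add(e["from_"])
--
--     expanded = set(seed_paths)
--     frontier = set(seed_paths)
--     for _ in range(hops - 1):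
--         next_f: set[str] = set()
--         for p in frontier:
--             for nb in adj.get(p, set()):
--                 if nb not in expanded:
--                     expanded.add(nb)
--                     next_f.add(nb)
--         frontier = next_f
--     return expanded
-- ===== SOURCE B (Python) =====
-- from typing import Any
-- from collections import deque
--
--
-- def _expand_hops(
--     seed_paths: set[str],
--     full_edges: list[Any],
--     hops: int,
-- ) -> set[str]:
--     """Single-queue BFS: each node carries its depth; no per-level frontier sets."""
--     adj: dict[str, set[str]] = {}
--     for e in full_edges:
--         adj.setdefault(e["from_"], set()).add(e["to_"])
--         adj.setdefault(e["to_"], set()).add(e["from_"])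
--
--     expanded = set(seed_paths)
--     queue = deque((p, 0) for p in seed_paths)
--     while queue:
--         p, d = queue.popleft()
--         if d < hops - 1:
--             for nb in adj.get(p, set()):
--                 if nb not in expanded:
--                     expanded.add(nb)
--                     queue.append((nb, d + 1))
--     return expanded
-- ===== Notes on version B (the rewrite author's own statement) =====
-- stated objective: alternative
-- what changed: Replaces the range(hops-1) level loop with per-level frontier sets by a single FIFO queue of (node, depth) pairs: one BFS loop that stops when the queue empties instead of always iterating hops-1 levels.
-- outside the precondition, e.g. on _expand_hops({'a'}, [{'x': 'y'}], 2): A raises KeyError, B raises KeyError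
import Mathlib
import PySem

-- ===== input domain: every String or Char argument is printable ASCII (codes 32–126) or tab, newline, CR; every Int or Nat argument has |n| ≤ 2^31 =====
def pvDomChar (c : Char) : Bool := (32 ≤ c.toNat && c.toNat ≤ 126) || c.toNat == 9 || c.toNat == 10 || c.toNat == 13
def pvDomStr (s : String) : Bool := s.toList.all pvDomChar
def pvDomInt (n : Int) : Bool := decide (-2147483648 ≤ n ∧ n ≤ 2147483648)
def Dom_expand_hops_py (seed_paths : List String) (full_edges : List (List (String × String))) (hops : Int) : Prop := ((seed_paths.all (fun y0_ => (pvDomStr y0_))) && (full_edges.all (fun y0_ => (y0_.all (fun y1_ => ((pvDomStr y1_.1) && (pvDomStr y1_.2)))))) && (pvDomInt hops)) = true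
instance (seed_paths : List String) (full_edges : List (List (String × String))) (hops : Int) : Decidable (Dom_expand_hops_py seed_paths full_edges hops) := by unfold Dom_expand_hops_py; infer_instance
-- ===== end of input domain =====

-- B replaces A's range(hops-1) per-level frontier loop by a single FIFO queue of (node, depth)
-- pairs — one BFS loop that stops when the queue empties.  Equivalence is about the returned
-- set's element list (both ports discover nodes in the same order).

-- ===== PORT A =====
-- e["from_"] / e["to_"]: first-match lookup in the edge dict; KeyError (missing key) is excluded by Pre_,
-- so the "" default below is never reached on admitted inputs.
def pvLookup (e : List (String × String)) (k : String) : String :=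
  ((PySem.Dict.mk e).get? k).getD ""

-- the adjacency loop shared verbatim by A and B:
-- adj.setdefault(e[k], set()).add(v)  ==  adj[e[k]] = adj.get(e[k], set()) ∪ {v}  ==  Dict.modify
def pvAdjOf (full_edges : List (List (String × String))) : PySem.Dict String (PySem.Set String) :=
  full_edges.foldl
    (fun d e =>
      ((d.modify (pvLookup e "from_") [] (fun s => PySem.Set.add s (pvLookup e "to_"))).modify
        (pvLookup e "to_") [] (fun s => PySem.Set.add s (pvLookup e "from_"))))
    PySem.Dict.empty

-- if nb not in expanded: expanded.add(nb); next_f.add(nb)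
def pvStepA (st : PySem.Set String × PySem.Set String) (nb : String) :
    PySem.Set String × PySem.Set String :=
  if PySem.Set.contains st.1 nb then st
  else (PySem.Set.add st.1 nb, PySem.Set.add st.2 nb)

-- for nb in adj.get(p, set()): …
def pvInnerA (adj : PySem.Dict String (PySem.Set String))
    (st : PySem.Set String × PySem.Set String) (p : String) :
    PySem.Set String × PySem.Set String :=
  (adj.getD p []).foldl pvStepA st

-- for _ in range(hops - 1): …  (count = (hops-1).toNat)
def pvLoopA (adj : PySem.Dict String (PySem.Set String)) :
    Nat → PySem.Set String → PySem.Set String → PySem.Set String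
  | 0, E, _ => E
  | Nat.succ n, E, F =>
      let r := F.foldl (fun st p => pvInnerA adj st p) (E, PySem.Set.empty)
      pvLoopA adj n r.1 r.2

def expand_hops_py (seed_paths : List String) (full_edges : List (List (String × String))) (hops : Int) : List String :=
  let adj := pvAdjOf full_edges
  pvLoopA adj (hops - 1).toNat (PySem.Set.ofList seed_paths) (PySem.Set.ofList seed_paths)

-- ===== PORT B =====
-- if nb not in expanded: expanded.add(nb); queue.append((nb, d + 1))
def pvStepB (d : Int) (st : PySem.Set String × List (String × Int)) (nb : String) :
    PySem.Set String × List (String × Int) :=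
  if PySem.Set.contains st.1 nb then st
  else (PySem.Set.add st.1 nb, st.2 ++ [(nb, d + 1)])

-- while queue: p, d = queue.popleft(); …   The fuel argument only makes the recursion total:
-- |seed_paths| + 2·|full_edges| bounds the number of pops (every pushed node was just added to
-- expanded, and at most 2·|full_edges| distinct nodes occur in the adjacency's values).
def pvBfs (adj : PySem.Dict String (PySem.Set String)) (hops : Int) :
    Nat → List (String × Int) → PySem.Set String → PySem.Set String
  | 0, _, E => E
  | _ + 1, [], E => E
  | fuel + 1, (p, d) :: q, E =>
      if d < hops - 1 then
        let r := (adj.getD p []).foldl (pvStepB d) (E, q)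
        pvBfs adj hops fuel r.2 r.1
      else pvBfs adj hops fuel q E

def expand_hops_py_alt (seed_paths : List String) (full_edges : List (List (String × String))) (hops : Int) : List String :=
  let adj := pvAdjOf full_edges
  pvBfs adj hops (seed_paths.length + 2 * full_edges.length)
    (seed_paths.map (fun p => (p, (0 : Int)))) (PySem.Set.ofList seed_paths)

-- ===== PRECONDITION & SPEC =====
-- Pre_ excludes (i) edge dicts missing the key "from_" or "to_", on which Python A raises KeyError,
-- and (ii) seed lists with duplicates, which do not encode a Python set (seed_paths is typed set[str]).
def Pre_expand_hops_py (seed_paths : List String) (full_edges : List (List (String × String))) (hops : Int) : Prop :=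
  seed_paths.Nodup ∧
    ∀ e ∈ full_edges, ((PySem.Dict.mk e).contains "from_" = true ∧ (PySem.Dict.mk e).contains "to_" = true)
instance (seed_paths : List String) (full_edges : List (List (String × String))) (hops : Int) : Decidable (Pre_expand_hops_py seed_paths full_edges hops) := by unfold Pre_expand_hops_py; infer_instance

def pvWitness_expand_hops_py : List String × (List (List (String × String))) × Int :=
  (["a"], [[("from_", "a"), ("to_", "b")]], 2)

def Spec_expand_hops_py (seed_paths : List String) (full_edges : List (List (String × String))) (hops : Int) (out : List String) : Prop := out = expand_hops_py_alt seed_paths full_edges hops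
instance (seed_paths : List String) (full_edges : List (List (String × String))) (hops : Int) (out : List String) : Decidable (Spec_expand_hops_py seed_paths full_edges hops out) := by unfold Spec_expand_hops_py; infer_instance

-- ===== CLAIM (what is proved, stated in full; the proofs are below) =====
def Claim_equal_expand_hops_py : Prop := ∀ (seed_paths : List String) (full_edges : List (List (String × String))) (hops : Int), Dom_expand_hops_py seed_paths full_edges hops → Pre_expand_hops_py seed_paths full_edges hops → Spec_expand_hops_py seed_paths full_edges hops (expand_hops_py seed_paths full_edges hops)

-- ===== LEMMAS AND PROOFS =====

-- the fresh neighbours a node contributes, in discovery order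
def pvNew (E : List String) : List String → List String
  | [] => []
  | nb :: t => if nb ∈ E then pvNew E t else nb :: pvNew (E ++ [nb]) t

-- reference one-level expansion: (final expanded, all fresh nodes of the level in order)
def pvLev (adj : PySem.Dict String (PySem.Set String)) :
    List String → List String → List String × List String
  | [], E => (E, [])
  | p :: rest, E =>
      let new := pvNew E (adj.getD p [])
      let r := pvLev adj rest (E ++ new)
      (r.1, new ++ r.2)

-- reference level iteration
def pvLoopR (adj : PySem.Dict String (PySem.Set String)) :
    Nat → List String → List String → List String
  | 0, E, _ => E
  | n + 1, E, F => pvLoopR adj n (pvLev adj F E).1 (pvLev adj F E).2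

-- exact number of queue pops B performs
def pvPops (adj : PySem.Dict String (PySem.Set String)) :
    Nat → List String → List String → Nat
  | 0, _, F => F.length
  | n + 1, E, F => F.length + pvPops adj n (pvLev adj F E).1 (pvLev adj F E).2

theorem pvNew_subset (nbs : List String) : ∀ E x, x ∈ pvNew E nbs → x ∈ nbs := by
  induction nbs with
  | nil => simp [pvNew]
  | cons nb t ih =>
      intro E x hx
      simp only [pvNew] at hx
      split at hx
      · exact List.mem_cons_of_mem _ (ih E x hx)
      · rcases List.mem_cons.1 hx with h | h
        · simp [h]
        · exact List.mem_cons_of_mem _ (ih _ x h)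

theorem pvNew_nodup (nbs : List String) : ∀ E, E.Nodup → (E ++ pvNew E nbs).Nodup := by
  induction nbs with
  | nil => intro E hE; simpa [pvNew]
  | cons nb t ih =>
      intro E hE
      simp only [pvNew]
      split
      · exact ih E hE
      · rename_i hnb
        have : (E ++ (nb :: pvNew (E ++ [nb]) t)) = (E ++ [nb]) ++ pvNew (E ++ [nb]) t := by
          simp
        rw [this]
        refine ih (E ++ [nb]) ?_
        simp only [List.nodup_append, List.nodup_singleton, true_and]
        refine ⟨hE, ?_⟩
        intro a ha b hb
        simp only [List.mem_singleton] at hb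
        subst hb
        exact fun h => hnb (h ▸ ha)

theorem pvFoldA (nbs : List String) : ∀ E N, (∀ x ∈ N, x ∈ E) →
    nbs.foldl pvStepA (E, N) = (E ++ pvNew E nbs, N ++ pvNew E nbs) := by
  induction nbs with
  | nil => intro E N _; simp [pvNew]
  | cons nb t ih =>
      intro E N hNE
      by_cases hm : nb ∈ E
      · simpa [pvStepA, pvNew, (PySem.Set.contains_iff _ _).2 hm, hm] using ih E N hNE
      · have hN : nb ∉ N := fun h => hm (hNE nb h)
        have hc : PySem.Set.contains E nb = false := by
          by_contra h
          exact hm ((PySem.Set.contains_iff _ _).1 (by revert h; cases PySem.Set.contains E nb <;> simp))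
        simp only [List.foldl_cons, pvStepA, hc, Bool.false_eq_true, if_false,
          PySem.Set.add_of_not_mem hm, PySem.Set.add_of_not_mem hN, pvNew, hm, if_false]
        have := ih (E ++ [nb]) (N ++ [nb]) (by
          intro x hx
          rcases List.mem_append.1 hx with h | h
          · exact List.mem_append.2 (Or.inl (hNE x h))
          · exact List.mem_append.2 (Or.inr h))
        simp [this]

theorem pvFoldB (nbs : List String) : ∀ E q (d : Int), nbs.foldl (pvStepB d) (E, q) =
    (E ++ pvNew E nbs, q ++ (pvNew E nbs).map (fun x => (x, d + 1))) := by
  induction nbs with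
  | nil => intro E q d; simp [pvNew]
  | cons nb t ih =>
      intro E q d
      by_cases hm : nb ∈ E
      · simpa [pvStepB, pvNew, (PySem.Set.contains_iff _ _).2 hm, hm] using ih E q d
      · have hc : PySem.Set.contains E nb = false := by
          by_contra h
          exact hm ((PySem.Set.contains_iff _ _).1 (by revert h; cases PySem.Set.contains E nb <;> simp))
        simp only [List.foldl_cons, pvStepB, hc, Bool.false_eq_true, if_false,
          PySem.Set.add_of_not_mem hm, pvNew, hm]
        simp [ih (E ++ [nb]) (q ++ [(nb, d + 1)]) d]

theorem pvLevelA (adj : PySem.Dict String (PySem.Set String)) (F : List String) :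
    ∀ E N, (∀ x ∈ N, x ∈ E) →
    F.foldl (fun st p => pvInnerA adj st p) (E, N) = ((pvLev adj F E).1, N ++ (pvLev adj F E).2) := by
  induction F with
  | nil => intro E N _; simp [pvLev]
  | cons p rest ih =>
      intro E N hNE
      have h1 : pvInnerA adj (E, N) p =
          (E ++ pvNew E (adj.getD p []), N ++ pvNew E (adj.getD p [])) :=
        pvFoldA _ E N hNE
      have h2 := ih (E ++ pvNew E (adj.getD p [])) (N ++ pvNew E (adj.getD p [])) (by
        intro x hx
        rcases List.mem_append.1 hx with h | h
        · exact List.mem_append.2 (Or.inl (hNE x h))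
        · exact List.mem_append.2 (Or.inr h))
      simp only [List.foldl_cons, h1, h2, pvLev]
      simp

theorem pvLoopAR (adj : PySem.Dict String (PySem.Set String)) :
    ∀ n E F, pvLoopA adj n E F = pvLoopR adj n E F := by
  intro n
  induction n with
  | zero => intro E F; rfl
  | succ n ih =>
      intro E F
      have h := pvLevelA adj F E PySem.Set.empty (by intro x hx; cases hx)
      simp only [pvLoopA, pvLoopR, h]
      simpa using ih (pvLev adj F E).1 (pvLev adj F E).2

theorem pvDrain (adj : PySem.Dict String (PySem.Set String)) (hops : Int) :
    ∀ q E fuel, (∀ pd ∈ q, ¬ (pd.2 < hops - 1)) → q.length ≤ fuel →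
    pvBfs adj hops fuel q E = E := by
  intro q
  induction q with
  | nil => intro E fuel _ _; cases fuel <;> rfl
  | cons pd rest ih =>
      intro E fuel hq hf
      cases fuel with
      | zero => simp at hf
      | succ f =>
          obtain ⟨p, d⟩ := pd
          have hd : ¬ (d < hops - 1) := hq (p, d) (by simp)
          simp only [pvBfs, hd, if_false]
          exact ih E f (fun x hx => hq x (List.mem_cons_of_mem _ hx)) (by simpa using hf)

theorem pvLevelB (adj : PySem.Dict String (PySem.Set String)) (hops : Int) (F : List String) :
    ∀ E nxt (d : Int) k, d < hops - 1 →
    pvBfs adj hops (F.length + k)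
      (F.map (fun p => (p, d)) ++ nxt.map (fun p => (p, d + 1))) E
    = pvBfs adj hops k ((nxt ++ (pvLev adj F E).2).map (fun p => (p, d + 1))) (pvLev adj F E).1 := by
  induction F with
  | nil => intro E nxt d k _; simp [pvLev]
  | cons p rest ih =>
      intro E nxt d k hd
      have hlen : (p :: rest).length + k = (rest.length + k) + 1 := by
        simp [List.length_cons]; omega
      rw [hlen]
      simp only [List.map_cons, List.cons_append, pvBfs, hd, if_true]
      rw [pvFoldB]
      have hq : (rest.map (fun p => (p, d)) ++ nxt.map (fun p => (p, d + 1))) ++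
          (pvNew E (adj.getD p [])).map (fun x => (x, d + 1))
          = rest.map (fun p => (p, d)) ++ (nxt ++ pvNew E (adj.getD p [])).map (fun p => (p, d + 1)) := by
        simp
      rw [hq, ih (E ++ pvNew E (adj.getD p [])) (nxt ++ pvNew E (adj.getD p [])) d k hd]
      simp [pvLev]

theorem pvLevels (adj : PySem.Dict String (PySem.Set String)) (hops : Int) :
    ∀ (n : Nat) (d : Int) E F k, ((n : Int) + d = hops - 1 ∨ (n = 0 ∧ hops - 1 ≤ d)) →
    pvBfs adj hops (pvPops adj n E F + k) (F.map (fun p => (p, d))) E = pvLoopR adj n E F := by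
  intro n
  induction n with
  | zero =>
      intro d E F k hcond
      have hd : hops - 1 ≤ d := by rcases hcond with h | ⟨_, h⟩ <;> omega
      apply pvDrain
      · intro pd hpd
        obtain ⟨x, _, hx⟩ := List.mem_map.1 hpd
        subst hx; simp; omega
      · simp [pvPops]
  | succ n ih =>
      intro d E F k hcond
      have hd : d < hops - 1 := by
        rcases hcond with h | ⟨h, _⟩
        · omega
        · simp at h
      have hF : F.map (fun p => (p, d)) =
          F.map (fun p => (p, d)) ++ ([] : List String).map (fun p => (p, d + 1)) := by simp
      have hfuel : pvPops adj (n + 1) E F + k =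
          F.length + (pvPops adj n (pvLev adj F E).1 (pvLev adj F E).2 + k) := by
        simp [pvPops]; omega
      rw [hfuel, hF, pvLevelB adj hops F E [] d _ hd]
      simp only [List.nil_append]
      have := ih (d + 1) (pvLev adj F E).1 (pvLev adj F E).2 k (by
        rcases hcond with h | ⟨h, _⟩
        · left; omega
        · simp at h)
      rw [this]
      rfl

-- (pvLev F E).1 = E ++ (pvLev F E).2
theorem pvLev_fst (adj : PySem.Dict String (PySem.Set String)) (F : List String) :
    ∀ E, (pvLev adj F E).1 = E ++ (pvLev adj F E).2 := by
  induction F with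
  | nil => intro E; simp [pvLev]
  | cons p rest ih =>
      intro E
      simp only [pvLev]
      rw [ih (E ++ pvNew E (adj.getD p []))]
      simp

theorem pvPops_le (adj : PySem.Dict String (PySem.Set String)) :
    ∀ n E F, pvPops adj n E F + E.length ≤ F.length + (pvLoopR adj n E F).length := by
  intro n
  induction n with
  | zero => intro E F; simp [pvPops, pvLoopR]
  | succ n ih =>
      intro E F
      have h := ih (pvLev adj F E).1 (pvLev adj F E).2
      have hfst : (pvLev adj F E).1.length = E.length + (pvLev adj F E).2.length := by
        rw [pvLev_fst]; simp
      simp only [pvPops, pvLoopR]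
      omega

-- all nodes stored in the adjacency's value sets occur among the edge endpoints
def pvV (full_edges : List (List (String × String))) : List String :=
  full_edges.flatMap (fun e => [pvLookup e "from_", pvLookup e "to_"])

theorem pvV_length (full_edges : List (List (String × String))) :
    (pvV full_edges).length = 2 * full_edges.length := by
  induction full_edges with
  | nil => rfl
  | cons e rest ih => simp [pvV, List.flatMap_cons] at ih ⊢; omega

theorem pvAdj_fold_sub (P : String → Prop) :
    ∀ (l : List (List (String × String))) (d : PySem.Dict String (PySem.Set String)),
    (∀ e ∈ l, P (pvLookup e "from_") ∧ P (pvLookup e "to_")) →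
    (∀ p x, x ∈ d.getD p [] → P x) →
    ∀ p x, x ∈ (l.foldl
      (fun d e =>
        ((d.modify (pvLookup e "from_") [] (fun s => PySem.Set.add s (pvLookup e "to_"))).modify
          (pvLookup e "to_") [] (fun s => PySem.Set.add s (pvLookup e "from_")))) d).getD p [] → P x := by
  intro l
  induction l with
  | nil => intro d _ hd p x hx; exact hd p x hx
  | cons e rest ih =>
      intro d hl hd p x hx
      refine ih _ (fun e' he' => hl e' (List.mem_cons_of_mem _ he')) ?_ p x hx
      intro p' x' hx'
      have hP : P (pvLookup e "from_") ∧ P (pvLookup e "to_") := hl e (by simp)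
      rw [PySem.Dict.getD_modify] at hx'
      split at hx'
      · rcases (PySem.Set.mem_add _ _ _).1 hx' with h | h
        · rw [PySem.Dict.getD_modify] at h
          split at h
          · rcases (PySem.Set.mem_add _ _ _).1 h with h2 | h2
            · exact hd _ x' h2
            · subst h2; exact hP.2
          · exact hd _ x' h
        · subst h; exact hP.1
      · rw [PySem.Dict.getD_modify] at hx'
        split at hx'
        · rcases (PySem.Set.mem_add _ _ _).1 hx' with h | h
          · exact hd _ x' h
          · subst h; exact hP.2
        · exact hd _ x' hx'

theorem pvAdj_values_sub (full_edges : List (List (String × String))) :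
    ∀ p x, x ∈ (pvAdjOf full_edges).getD p [] → x ∈ pvV full_edges := by
  intro p x hx
  refine pvAdj_fold_sub (fun y => y ∈ pvV full_edges) full_edges PySem.Dict.empty ?_ ?_ p x hx
  · intro e he
    constructor <;> (unfold pvV; exact List.mem_flatMap.2 ⟨e, he, by simp⟩)
  · intro p' x' hx'
    simp [PySem.Dict.getD_empty] at hx'

theorem pvLoopR_inv (adj : PySem.Dict String (PySem.Set String)) (W : List String)
    (hadj : ∀ p x, x ∈ adj.getD p [] → x ∈ W) :
    ∀ n E F, E.Nodup → (∀ x ∈ E, x ∈ W) →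
    (pvLoopR adj n E F).Nodup ∧ (∀ x ∈ pvLoopR adj n E F, x ∈ W) := by
  have hlev : ∀ F E, E.Nodup → (∀ x ∈ E, x ∈ W) →
      (pvLev adj F E).1.Nodup ∧ (∀ x ∈ (pvLev adj F E).1, x ∈ W) := by
    intro F
    induction F with
    | nil => intro E h1 h2; exact ⟨h1, h2⟩
    | cons p rest ih =>
        intro E h1 h2
        simp only [pvLev]
        refine ih _ (pvNew_nodup _ _ h1) ?_
        intro x hx
        rcases List.mem_append.1 hx with h | h
        · exact h2 x h
        · exact hadj p x (pvNew_subset _ _ _ h)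
  intro n
  induction n with
  | zero => intro E F h1 h2; exact ⟨h1, h2⟩
  | succ n ih =>
      intro E F h1 h2
      have h := hlev F E h1 h2
      exact ih _ _ h.1 h.2

theorem pvNodup_length_le (l W : List String) (h1 : l.Nodup) (h2 : ∀ x ∈ l, x ∈ W) :
    l.length ≤ W.length := by
  calc l.length = l.toFinset.card := (List.toFinset_card_of_nodup h1).symm
    _ ≤ W.toFinset.card := Finset.card_le_card (fun x hx => by
        simp only [List.mem_toFinset] at hx ⊢; exact h2 x hx)
    _ ≤ W.length := List.toFinset_card_le W

-- ===== VERDICT (by name: the statement is the Claim_ definition above) =====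
theorem expand_hops_py_spec : Claim_equal_expand_hops_py := by
  intro seeds es hops _ hpre
  unfold Spec_expand_hops_py expand_hops_py expand_hops_py_alt
  obtain ⟨hnd, _⟩ := hpre
  have hof : PySem.Set.ofList seeds = seeds := PySem.Set.ofList_eq_self_of_nodup _ hnd
  set adj := pvAdjOf es with hadj
  set n := (hops - 1).toNat with hn
  -- A side
  rw [hof, pvLoopAR]
  -- B side: fuel = pops + slack
  have hW : ∀ x ∈ seeds, x ∈ seeds ++ pvV es := fun x hx => List.mem_append.2 (Or.inl hx)
  have hinv := pvLoopR_inv adj (seeds ++ pvV es)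
    (fun p x hx => List.mem_append.2 (Or.inr (pvAdj_values_sub es p x hx))) n seeds seeds hnd hW
  have hfin : (pvLoopR adj n seeds seeds).length ≤ seeds.length + 2 * es.length := by
    have := pvNodup_length_le _ _ hinv.1 hinv.2
    have hv := pvV_length es
    simp only [List.length_append] at this
    omega
  have hpop : pvPops adj n seeds seeds ≤ seeds.length + 2 * es.length := by
    have := pvPops_le adj n seeds seeds
    omega
  have hfuel : seeds.length + 2 * es.length =
      pvPops adj n seeds seeds + (seeds.length + 2 * es.length - pvPops adj n seeds seeds) := by
    omega
  have hcond : ((n : Int) + 0 = hops - 1 ∨ (n = 0 ∧ hops - 1 ≤ 0)) := by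
    rcases le_or_gt (hops - 1) 0 with h | h
    · right; constructor
      · simp [hn]; omega
      · omega
    · left; simp [hn]; omega
  show pvLoopR adj n seeds seeds =
    pvBfs adj hops (seeds.length + 2 * es.length) (seeds.map (fun p => (p, (0 : Int)))) seeds
  rw [hfuel, pvLevels adj hops n 0 seeds seeds _ hcond]
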